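-- pv_equiv track=rewrite | github.com/iwkiwk/nlp-course | 18-11-18/subway_navigator.py | get_least_path_num
-- ===== SOURCE A (Python) =====
-- from itertools import product
--
-- def get_least_path_num(paths):
--     nums = []
--     for path in product(*paths):
--         s = set()
--         for p in path:
--             s.add(p)
--         nums.append(len(s))
--     return min(nums)
-- ===== SOURCE B (Python) =====
-- def get_least_path_num(paths):
--     # DP over distinct chosen-value sets: the frontier holds each reachable
--     # set of values once, instead of enumerating the full Cartesian product.
--     frontier = {frozenset()}
--     for path in paths:
--         frontier = {s | {p} for s in frontier for p in path}
--     return min(len(s) for s in frontier)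
-- ===== Notes on version B (the rewrite author's own statement) =====
-- stated objective: alternative
-- what changed: Replaces the full Cartesian-product enumeration of tuples with a frontier DP over distinct frozensets of chosen values, deduplicating equal value-sets after each group.
import Mathlib
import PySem

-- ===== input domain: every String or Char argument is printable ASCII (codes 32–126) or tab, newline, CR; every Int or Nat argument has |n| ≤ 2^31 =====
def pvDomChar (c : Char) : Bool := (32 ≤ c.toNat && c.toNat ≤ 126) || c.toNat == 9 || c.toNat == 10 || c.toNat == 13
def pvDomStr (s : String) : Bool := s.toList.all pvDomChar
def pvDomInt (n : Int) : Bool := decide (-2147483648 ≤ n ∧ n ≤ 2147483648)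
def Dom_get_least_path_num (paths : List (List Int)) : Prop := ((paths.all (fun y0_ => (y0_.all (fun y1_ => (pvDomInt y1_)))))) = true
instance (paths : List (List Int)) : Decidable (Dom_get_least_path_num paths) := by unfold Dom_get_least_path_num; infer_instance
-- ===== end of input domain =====

-- B replaces A's full Cartesian-product enumeration of tuples by a frontier DP over the
-- DISTINCT sets of chosen values, deduplicated after every group (alternative algorithm).

-- ===== PORT A =====
-- itertools.product(*paths), transliterated as the documented pure-Python equivalent:
-- result = [[]]; for pool in pools: result = [x+[y] for x in result for y in pool]
def pvProduct (paths : List (List Int)) : List (List Int) :=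
  paths.foldl (fun acc pool => acc.flatMap (fun t => pool.map (fun y => t ++ [y]))) [[]]

def get_least_path_num (paths : List (List Int)) : Int :=
  let nums := (pvProduct paths).foldl
    (fun nums path =>
      nums ++ [PySem.Set.len (path.foldl (fun s p => PySem.Set.add s p) (PySem.Set.empty : PySem.Set Int))]) []
  match PySem.List.min? nums (fun x => x) with
  | some m => m
  | none => 0   -- unreachable under Pre_ (Python: min([]) raises ValueError)

-- ===== PORT B =====
-- Python frozenset is modeled as Finset Int (exact: frozenset equality IS set equality,
-- and the final min over the set frontier is order-independent).
def pvStep (fr : PySem.Set (Finset Int)) (path : List Int) : PySem.Set (Finset Int) :=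
  fr.foldl (fun acc s => path.foldl (fun acc p => PySem.Set.add acc (insert p s)) acc) PySem.Set.empty

def get_least_path_num_alt (paths : List (List Int)) : Int :=
  let frontier := paths.foldl pvStep (PySem.Set.ofList [(∅ : Finset Int)])
  match PySem.List.min? (frontier.map (fun s => (s.card : Int))) (fun x => x) with
  | some m => m
  | none => 0   -- unreachable under Pre_ (Python: min of an empty generator raises ValueError)

-- ===== PRECONDITION & SPEC =====
-- Pre_ excludes exactly the inputs where A raises ValueError (min of an empty list):
-- a nonempty paths containing an empty path; B raises ValueError there too.
def Pre_get_least_path_num (paths : List (List Int)) : Prop := ∀ p ∈ paths, p ≠ []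
instance (paths : List (List Int)) : Decidable (Pre_get_least_path_num paths) := by
  unfold Pre_get_least_path_num; infer_instance
def pvWitness_get_least_path_num : List (List Int) := [[1, 2], [2, 3]]

def Spec_get_least_path_num (paths : List (List Int)) (out : Int) : Prop := out = get_least_path_num_alt paths
instance (paths : List (List Int)) (out : Int) : Decidable (Spec_get_least_path_num paths out) := by unfold Spec_get_least_path_num; infer_instance

-- ===== CLAIM (what is proved, stated in full; the proofs are below) =====
def Claim_equal_get_least_path_num : Prop := ∀ (paths : List (List Int)), Dom_get_least_path_num paths → Pre_get_least_path_num paths → Spec_get_least_path_num paths (get_least_path_num paths)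

-- ===== LEMMAS AND PROOFS =====

-- the set of values of a tuple, as a Finset
def pvCanon (t : List Int) : Finset Int := t.foldl (fun f p => insert p f) ∅

theorem pvCanon_append_singleton (t : List Int) (y : Int) :
    pvCanon (t ++ [y]) = insert y (pvCanon t) := by
  simp [pvCanon, List.foldl_append]

-- A's inner set-building loop counts exactly the card of pvCanon
theorem pvLen_foldl_add (t : List Int) (s : PySem.Set Int) (f : Finset Int)
    (hnd : s.Nodup) (hmem : ∀ x, x ∈ s ↔ x ∈ f) :
    (t.foldl (fun s p => PySem.Set.add s p) s).length = (t.foldl (fun f p => insert p f) f).card := by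
  induction t generalizing s f with
  | nil =>
    simp only [List.foldl_nil]
    have : s.toFinset = f := by
      ext x; simp [List.mem_toFinset, hmem x]
    rw [← this, List.toFinset_card_of_nodup hnd]
  | cons p t ih =>
    simp only [List.foldl_cons]
    exact ih (PySem.Set.add s p) (insert p f) (PySem.Set.nodup_add s p hnd)
      (fun x => by rw [PySem.Set.mem_add s p x, Finset.mem_insert, hmem x, or_comm])

-- membership in one DP step of B
theorem pv_mem_inner (path : List Int) (s : Finset Int) (acc : PySem.Set (Finset Int)) (x : Finset Int) :
    x ∈ path.foldl (fun acc p => PySem.Set.add acc (insert p s)) acc ↔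
      x ∈ acc ∨ ∃ p ∈ path, x = insert p s :=
  PySem.Set.mem_foldl_add path (fun p => insert p s) acc x

theorem pv_mem_step (fr : PySem.Set (Finset Int)) (path : List Int) (x : Finset Int) :
    x ∈ pvStep fr path ↔ ∃ s ∈ fr, ∃ p ∈ path, x = insert p s := by
  unfold pvStep
  suffices h : ∀ (acc : PySem.Set (Finset Int)),
      x ∈ fr.foldl (fun acc s => path.foldl (fun acc p => PySem.Set.add acc (insert p s)) acc) acc ↔
        x ∈ acc ∨ ∃ s ∈ fr, ∃ p ∈ path, x = insert p s by
    simpa [PySem.Set.empty] using h PySem.Set.empty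
  induction fr with
  | nil => simp
  | cons s fr ih =>
    intro acc
    simp only [List.foldl_cons, ih, pv_mem_inner]
    constructor
    · rintro ((h | ⟨p, hp, rfl⟩) | ⟨s', hs', p, hp, rfl⟩)
      · exact Or.inl h
      · exact Or.inr ⟨s, List.mem_cons_self .., p, hp, rfl⟩
      · exact Or.inr ⟨s', List.mem_cons_of_mem _ hs', p, hp, rfl⟩
    · rintro (h | ⟨s', hs', p, hp, rfl⟩)
      · exact Or.inl (Or.inl h)
      · rcases List.mem_cons.mp hs' with rfl | hs'
        · exact Or.inl (Or.inr ⟨p, hp, rfl⟩)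
        · exact Or.inr ⟨s', hs', p, hp, rfl⟩

-- the frontier is exactly the set of pvCanon-images of A's tuples
theorem pv_frontier_inv (paths : List (List Int)) (T : List (List Int)) (fr : PySem.Set (Finset Int))
    (h : ∀ x, x ∈ fr ↔ ∃ t ∈ T, pvCanon t = x) :
    ∀ x, x ∈ paths.foldl pvStep fr ↔
      ∃ t ∈ paths.foldl (fun acc pool => acc.flatMap (fun t => pool.map (fun y => t ++ [y]))) T,
        pvCanon t = x := by
  induction paths generalizing T fr with
  | nil => simpa using h
  | cons pool paths ih =>
    simp only [List.foldl_cons]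
    apply ih
    intro x
    rw [pv_mem_step fr pool x]
    constructor
    · rintro ⟨s, hs, p, hp, rfl⟩
      obtain ⟨t, ht, rfl⟩ := (h s).mp hs
      exact ⟨t ++ [p], List.mem_flatMap.mpr ⟨t, ht, List.mem_map.mpr ⟨p, hp, rfl⟩⟩,
        pvCanon_append_singleton t p⟩
    · rintro ⟨t', ht', rfl⟩
      obtain ⟨t, ht, hy⟩ := List.mem_flatMap.mp ht'
      obtain ⟨p, hp, rfl⟩ := List.mem_map.mp hy
      exact ⟨pvCanon t, (h _).mpr ⟨t, ht, rfl⟩, p, hp, (pvCanon_append_singleton t p)⟩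

-- min? (with identity key) depends only on membership
theorem pv_min?_congr (l l' : List Int) (h : ∀ x, x ∈ l ↔ x ∈ l') :
    PySem.List.min? l (fun x => x) = PySem.List.min? l' (fun x => x) := by
  rcases hl : PySem.List.min? l (fun x => x) with _ | m
  · have : l = [] := (PySem.List.min?_eq_none_iff l _).mp hl
    subst this
    have hnil : l' = [] := List.eq_nil_iff_forall_not_mem.mpr (fun x hx => by simpa using (h x).mpr hx)
    subst hnil
    exact ((PySem.List.min?_eq_none_iff [] _).mpr rfl).symm
  · rcases hl' : PySem.List.min? l' (fun x => x) with _ | m'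
    · have : l' = [] := (PySem.List.min?_eq_none_iff l' _).mp hl'
      subst this
      exact absurd ((h m).mp (PySem.List.min?_mem hl)) (by simp)
    · have h1 : m ≤ m' := PySem.List.min?_isMin hl m' ((h m').mpr (PySem.List.min?_mem hl'))
      have h2 : m' ≤ m := PySem.List.min?_isMin hl' m ((h m).mp (PySem.List.min?_mem hl))
      simp [le_antisymm h1 h2]

-- ===== VERDICT (by name: the statement is the Claim_ definition above) =====
theorem get_least_path_num_spec : Claim_equal_get_least_path_num := by
  intro paths _ hpre
  unfold Spec_get_least_path_num get_least_path_num get_least_path_num_alt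
  have hfr : ∀ x, x ∈ paths.foldl pvStep (PySem.Set.ofList [(∅ : Finset Int)]) ↔
      ∃ t ∈ pvProduct paths, pvCanon t = x := by
    intro x
    exact pv_frontier_inv paths [[]] (PySem.Set.ofList [(∅ : Finset Int)])
      (fun x => by simp [PySem.Set.ofList, PySem.Set.add, pvCanon, eq_comm]) x
  -- A's nums list is a map
  rw [PySem.List.foldl_append_singleton_eq_map
    (fun path => PySem.Set.len (path.foldl (fun s p => PySem.Set.add s p) (PySem.Set.empty : PySem.Set Int)))
    (pvProduct paths) []]
  have hlen : ∀ t : List Int,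
      PySem.Set.len (t.foldl (fun s p => PySem.Set.add s p) (PySem.Set.empty : PySem.Set Int))
        = ((pvCanon t).card : Int) := by
    intro t
    have h := pvLen_foldl_add t PySem.Set.empty ∅ (by simp [PySem.Set.empty]) (by simp [PySem.Set.empty])
    simp only [PySem.Set.empty] at h
    simp [PySem.Set.len, pvCanon, h]
  have hmm : PySem.List.min? (List.map (fun path => PySem.Set.len (path.foldl (fun s p => PySem.Set.add s p) (PySem.Set.empty : PySem.Set Int))) (pvProduct paths)) (fun x => x)
      = PySem.List.min? ((paths.foldl pvStep (PySem.Set.ofList [(∅ : Finset Int)])).map (fun s => (s.card : Int))) (fun x => x) := by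
    apply pv_min?_congr
    intro v
    simp only [List.mem_map]
    constructor
    · rintro ⟨t, ht, rfl⟩
      exact ⟨pvCanon t, (hfr _).mpr ⟨t, ht, rfl⟩, (hlen t).symm⟩
    · rintro ⟨s, hs, rfl⟩
      obtain ⟨t, ht, rfl⟩ := (hfr s).mp hs
      exact ⟨t, ht, hlen t⟩
  simp only [List.nil_append] at hmm ⊢
  rw [hmm]
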